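-- pv_equiv track=rewrite | github.com/mirzadm/project-euler-py | src/p016.py | calc_big_power_of_two
-- ===== SOURCE A (Python) =====
-- def calc_big_power_of_two(p):
--     """Calculates 2 to the `p`.
--
--     Arg:
--         `p`: Nonegative integer.
--     Returns:
--         List of digits of 2 to `p`. Least important digit first.
--     Raises:
--         ValueError: negative `p`.
--     """
--     if p < 0:
--         raise ValueError("Value of power should be non-negative.")
--     result_digits = [1]
--     for _ in range(p):
--         carry = 0
--         for i in range(len(result_digits)):
--             next_sum = carry + result_digits[i] * 2
--             carry = next_sum // 10
--             result_digits[i] = next_sum % 10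
--         if carry:
--             result_digits.append(carry)
--     return result_digits
-- ===== SOURCE B (Python) =====
-- def calc_big_power_of_two(p):
--     """Calculates 2 to the `p`.
--
--     Arg:
--         `p`: Nonegative integer.
--     Returns:
--         List of digits of 2 to `p`. Least important digit first.
--     Raises:
--         ValueError: negative `p`.
--     """
--     if p < 0:
--         raise ValueError("Value of power should be non-negative.")
--     n = 2 ** p
--     digits = []
--     while n:
--         n, r = divmod(n, 10)
--         digits.append(r)
--     return digits
-- ===== Notes on version B (the rewrite author's own statement) =====
-- stated objective: faster
-- what changed: Instead of simulating grade-school doubling on a digit list once per unit of the exponent, B computes the power directly with Python's built-in big-int exponentiation and then extracts the decimal digits with one divmod loop.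
import Mathlib
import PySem

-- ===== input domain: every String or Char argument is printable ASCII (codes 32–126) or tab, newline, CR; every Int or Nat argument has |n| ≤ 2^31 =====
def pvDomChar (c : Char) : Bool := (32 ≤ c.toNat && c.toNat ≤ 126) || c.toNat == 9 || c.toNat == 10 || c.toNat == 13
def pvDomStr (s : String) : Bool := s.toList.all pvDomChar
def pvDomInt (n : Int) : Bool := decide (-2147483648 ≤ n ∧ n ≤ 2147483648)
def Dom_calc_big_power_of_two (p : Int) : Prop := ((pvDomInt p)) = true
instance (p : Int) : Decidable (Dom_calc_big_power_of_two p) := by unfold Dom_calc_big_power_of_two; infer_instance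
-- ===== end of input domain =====

-- B replaces A's p-fold grade-school doubling of a digit list by computing 2^p directly
-- and extracting its decimal digits once (objective: faster).


-- ===== PORT A =====
-- inner 'for i in range(len(result_digits))' loop (in-place doubling with carry),
-- including the trailing 'if carry: result_digits.append(carry)'
def pvDblA (carry : Int) : List Int → List Int
  | [] => if carry ≠ 0 then [carry] else []
  | d :: rest =>
      PySem.Int.mod (carry + d * 2) 10 :: pvDblA (PySem.Int.floordiv (carry + d * 2) 10) rest

def calc_big_power_of_two (p : Int) : List Int :=
  (List.range p.toNat).foldl (fun ds _ => pvDblA 0 ds) [1]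

-- ===== PORT B =====
-- 'while n: n, r = divmod(n, 10); digits.append(r)'
def pvDigitsB (n : Nat) : List Int :=
  if n = 0 then [] else ((n % 10 : Nat) : Int) :: pvDigitsB (n / 10)
decreasing_by exact Nat.div_lt_self (by omega) (by omega)

def calc_big_power_of_two_alt (p : Int) : List Int :=
  pvDigitsB (2 ^ p.toNat)

-- ===== PRECONDITION & SPEC =====
-- A raises ValueError for p < 0 (and so does B); Pre_ excludes exactly those inputs.
def Pre_calc_big_power_of_two (p : Int) : Prop := 0 ≤ p
instance (p : Int) : Decidable (Pre_calc_big_power_of_two p) := by unfold Pre_calc_big_power_of_two; infer_instance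
def pvWitness_calc_big_power_of_two : Int := (7)

def Spec_calc_big_power_of_two (p : Int) (out : List Int) : Prop := out = calc_big_power_of_two_alt p
instance (p : Int) (out : List Int) : Decidable (Spec_calc_big_power_of_two p out) := by unfold Spec_calc_big_power_of_two; infer_instance

-- ===== CLAIM (what is proved, stated in full; the proofs are below) =====
def Claim_equal_calc_big_power_of_two : Prop := ∀ (p : Int), Dom_calc_big_power_of_two p → Pre_calc_big_power_of_two p → Spec_calc_big_power_of_two p (calc_big_power_of_two p)

-- ===== LEMMAS AND PROOFS =====

-- one pass of A's inner loop over the canonical digit list of n doubles the value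
theorem pvDblA_digits (n c : Nat) (hc : c ≤ 9) :
    pvDblA (c : Int) (pvDigitsB n) = pvDigitsB (2 * n + c) := by
  induction n using Nat.strong_induction_on generalizing c with
  | _ n ih =>
    have h0 : pvDigitsB 0 = [] := by rw [pvDigitsB]; simp
    rcases Nat.eq_zero_or_pos n with hn | hn
    · subst hn
      rcases Nat.eq_zero_or_pos c with hc0 | hc0
      · subst hc0; simp [h0, pvDblA]
      · have hR : pvDigitsB (2 * 0 + c) = ((c % 10 : Nat) : Int) :: pvDigitsB (c / 10) := by
          rw [show 2 * 0 + c = c from by omega, pvDigitsB, if_neg (show ¬ c = 0 by omega)]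
        rw [h0, hR, Nat.mod_eq_of_lt (show c < 10 by omega),
            Nat.div_eq_of_lt (show c < 10 by omega), h0]
        simp [pvDblA]
        omega
    · have hL : pvDigitsB n = ((n % 10 : Nat) : Int) :: pvDigitsB (n / 10) := by
        rw [pvDigitsB, if_neg (show ¬ n = 0 by omega)]
      have hR : pvDigitsB (2 * n + c) =
          (((2 * n + c) % 10 : Nat) : Int) :: pvDigitsB ((2 * n + c) / 10) := by
        rw [pvDigitsB, if_neg (show ¬ 2 * n + c = 0 by omega)]
      rw [hL, hR]
      simp only [pvDblA]
      have hcast : (c : Int) + ((n % 10 : Nat) : Int) * 2 = ((c + (n % 10) * 2 : Nat) : Int) := by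
        push_cast; ring
      have hm : PySem.Int.mod ((c + n % 10 * 2 : Nat) : Int) 10
          = (((c + n % 10 * 2) % 10 : Nat) : Int) := by
        rw [PySem.Int.mod_eq_emod_of_pos (by omega : (0:Int) < 10)]; omega
      have hd : PySem.Int.floordiv ((c + n % 10 * 2 : Nat) : Int) 10
          = (((c + n % 10 * 2) / 10 : Nat) : Int) := by
        rw [PySem.Int.floordiv_eq_ediv_of_pos (by omega : (0:Int) < 10)]; omega
      rw [hcast, hm, hd]
      rw [ih (n / 10) (Nat.div_lt_self hn (by omega)) ((c + n % 10 * 2) / 10) (by omega)]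
      have e1 : (c + n % 10 * 2) % 10 = (2 * n + c) % 10 := by omega
      have e2 : 2 * (n / 10) + (c + n % 10 * 2) / 10 = (2 * n + c) / 10 := by omega
      rw [e1, e2]

theorem foldl_pow (k : Nat) :
    (List.range k).foldl (fun ds _ => pvDblA 0 ds) [1] = pvDigitsB (2 ^ k) := by
  induction k with
  | zero => simp [pvDigitsB]
  | succ k ih =>
    rw [List.range_succ, List.foldl_append, ih]
    simp only [List.foldl_cons, List.foldl_nil]
    have := pvDblA_digits (2 ^ k) 0 (by omega)
    simpa [pow_succ, Nat.mul_comm] using this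

-- ===== VERDICT (by name: the statement is the Claim_ definition above) =====
theorem calc_big_power_of_two_spec : Claim_equal_calc_big_power_of_two := by
  intro p _ _
  unfold Spec_calc_big_power_of_two calc_big_power_of_two calc_big_power_of_two_alt
  exact foldl_pow p.toNat
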